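-- pv_equiv track=rewrite | github.com/bemnetne/climate-challenge-week0 | app/main.py | compute_streak
-- ===== SOURCE A (Python) =====
-- def compute_streak(series):
--     streak = 0
--     out = []
--
--     for v in series:
--         if v == 1:
--             streak += 1
--         else:
--             streak = 0
--
--         out.append(streak)
--
--     return out
-- ===== SOURCE B (Python) =====
-- def compute_streak(series):
--     out = []
--     i = 0
--     n = len(series)
--     while i < n:
--         j = i
--         while j < n and series[j] == series[i]:
--             j += 1
--         if series[i] == 1:
--             out.extend(range(1, j - i + 1))
--         else:
--             out.extend([0] * (j - i))
--         i = j
--     return out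
-- ===== Notes on version B (the rewrite author's own statement) =====
-- stated objective: alternative
-- what changed: Replaces the per-element streak accumulator with a run-length pass: scan maximal runs of equal values, then expand a run of 1s into 1..len and any other run into zeros.
import Mathlib
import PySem

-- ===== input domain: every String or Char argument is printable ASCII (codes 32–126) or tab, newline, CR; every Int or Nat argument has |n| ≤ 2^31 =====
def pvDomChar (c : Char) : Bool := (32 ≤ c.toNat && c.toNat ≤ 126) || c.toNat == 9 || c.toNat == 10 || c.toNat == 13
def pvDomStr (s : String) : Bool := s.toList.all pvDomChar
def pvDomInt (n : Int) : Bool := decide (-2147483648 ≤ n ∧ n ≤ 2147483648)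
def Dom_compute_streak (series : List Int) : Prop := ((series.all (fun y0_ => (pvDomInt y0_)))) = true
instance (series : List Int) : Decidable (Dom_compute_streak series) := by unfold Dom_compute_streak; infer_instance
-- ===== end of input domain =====

-- B replaces the per-element streak accumulator with a run-length pass: scan maximal runs of
-- equal values, then expand a run of 1s into 1..len and any other run into zeros.

-- ===== PORT A =====
-- the for-loop of A: carries the current streak, emits the updated streak for each element
def csGo (streak : Int) : List Int → List Int
  | [] => []
  | v :: rest =>
    let s := if v = 1 then streak + 1 else 0
    s :: csGo s rest

def compute_streak (series : List Int) : List Int := csGo 0 series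

-- ===== PORT B =====
-- the outer while of B: one (value, run length) pair per maximal run of equal values
def csRuns : List Int → List (Int × Nat)
  | [] => []
  | v :: rest =>
    (v, 1 + (rest.takeWhile (· = v)).length) :: csRuns (rest.dropWhile (· = v))
  termination_by l => l.length
  decreasing_by simp; exact List.length_dropWhile_le _ _

def compute_streak_alt (series : List Int) : List Int :=
  (csRuns series).flatMap (fun r =>
    if r.1 = 1 then (List.range r.2).map (fun (i : Nat) => (i : Int) + 1)
    else List.replicate r.2 0)

-- ===== PRECONDITION & SPEC =====
def Spec_compute_streak (series : List Int) (out : List Int) : Prop := out = compute_streak_alt series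
instance (series : List Int) (out : List Int) : Decidable (Spec_compute_streak series out) := by unfold Spec_compute_streak; infer_instance

-- ===== CLAIM (what is proved, stated in full; the proofs are below) =====
def Claim_equal_compute_streak : Prop := ∀ (series : List Int), Dom_compute_streak series → Spec_compute_streak series (compute_streak series)

-- ===== LEMMAS AND PROOFS =====

-- entering a list whose head is not 1, the carried streak is irrelevant
lemma csGo_head_ne_one (t : List Int) (s s' : Int) (h : ∀ w ∈ t.head?, w ≠ 1) :
    csGo s t = csGo s' t := by
  cases t with
  | nil => rfl
  | cons w t' =>
    have hw : w ≠ 1 := h w (by simp)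
    simp [csGo, hw]

-- a run of elements all ≠ 1 resets the streak and emits zeros
lemma csGo_ne_one (l t : List Int) (s : Int) (h : ∀ x ∈ l, x ≠ 1) (hl : l ≠ []) :
    csGo s (l ++ t) = List.replicate l.length 0 ++ csGo 0 t := by
  induction l generalizing s with
  | nil => exact absurd rfl hl
  | cons v l ih =>
    have hv : v ≠ 1 := h v (by simp)
    cases l with
    | nil => simp [csGo, hv]
    | cons u l' =>
      simp only [List.cons_append, csGo, if_neg hv, List.length_cons, List.replicate,
        List.cons_append]
      exact congrArg _ (ih 0 (fun x hx => h x (List.mem_cons_of_mem _ hx)) (by simp))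

-- a run of 1s counts up from s+1
lemma csGo_ones (l t : List Int) (s : Int) (h : ∀ x ∈ l, x = 1) :
    csGo s (l ++ t) = (List.range l.length).map (fun (i : Nat) => s + (i : Int) + 1)
      ++ csGo (s + l.length) t := by
  induction l generalizing s with
  | nil => simp
  | cons v l ih =>
    have hv : v = 1 := h v (by simp)
    simp only [List.cons_append, csGo, if_pos hv]
    rw [ih (s + 1) (fun x hx => h x (List.mem_cons_of_mem _ hx)), List.length_cons,
      List.range_succ_eq_map, List.map_cons, List.map_map, List.cons_append]
    congr 1
    · push_cast; ring
    congr 1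
    · apply List.map_congr_left; intro i _
      simp only [Function.comp_apply, Nat.succ_eq_add_one]
      push_cast; ring
    · congr 1; push_cast; ring

lemma main_lemma (l : List Int) : csGo 0 l = compute_streak_alt l := by
  unfold compute_streak_alt
  induction l using csRuns.induct with
  | case1 => simp [csRuns, csGo]
  | case2 v rest ih =>
    rw [csRuns]
    simp only [List.flatMap_cons]
    have hsplit : v :: rest = (v :: rest.takeWhile (· = v)) ++ rest.dropWhile (· = v) := by
      simp [List.takeWhile_append_dropWhile]
    have hmem : ∀ x ∈ v :: rest.takeWhile (· = v), x = v := by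
      intro x hx
      rcases List.mem_cons.mp hx with h | h
      · exact h
      · simpa using List.mem_takeWhile_imp h
    have hdrop : ∀ w ∈ (rest.dropWhile (· = v)).head?, w ≠ v := by
      intro w hw
      have := List.head?_dropWhile_not (p := (· = v)) rest
      cases hh : (rest.dropWhile (· = v)).head? with
      | none => simp [hh] at hw
      | some u =>
        simp [hh] at hw this
        subst hw; exact this
    by_cases hv : v = 1
    · subst hv
      rw [hsplit, csGo_ones _ _ 0 hmem, csGo_head_ne_one _ _ 0 hdrop, ih]
      simp [Nat.add_comm]
    · rw [hsplit, csGo_ne_one _ _ 0 (fun x hx => (hmem x hx) ▸ hv) (by simp)]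
      simp [hv, ih, Nat.add_comm]

-- ===== VERDICT (by name: the statement is the Claim_ definition above) =====
theorem compute_streak_spec : Claim_equal_compute_streak := by
  intro series _
  unfold Spec_compute_streak compute_streak
  exact main_lemma series
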